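-- pv_equiv track=rewrite | github.com/zhichul/batched_vocabulary_optimization | v0.0.2/src/bopt/unigram_lm_tokenizers/utils/indexing.py | start_position_based_indexing
-- ===== SOURCE A (Python) =====
-- SPBINDEX_CACHE = dict()
--
-- def start_position_based_indexing(M: int, L: int):
--     """
--     The returned indices can be used to extract ids / log potentials / conditional
--     marginals from serialized edge matrices.
--     """
--     if (M, L) in SPBINDEX_CACHE:
--         return SPBINDEX_CACHE[(M, L)]
--     num_substr_per_length = list(reversed(range(1, L + 1)))
--     num_substr_lt_length = [sum(num_substr_per_length[:i]) for i in range(L)]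
--     l = []
--     for i in range(L):
--         for j in range(i + 1, min(L + 1, i + M + 1)):
--             l.append(num_substr_lt_length[j - i - 1] + i)
--     SPBINDEX_CACHE[(M, L)] = l
--     return l
-- ===== SOURCE B (Python) =====
-- from itertools import accumulate
--
-- def start_position_based_indexing(M: int, L: int):
--     offsets = list(accumulate(range(L, 0, -1), initial=0))[:-1] if L > 0 else []
--     return [o + i for i in range(L) for o in offsets[:max(0, min(L - i, M))]]
-- ===== Notes on version B (the rewrite author's own statement) =====
-- stated objective: alternative
-- what changed: B builds the offset table once with a running prefix sum (itertools.accumulate) instead of re-summing slices for every length, and emits the indices with a flat comprehension over slices of that table instead of A's nested index-arithmetic loops.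
import Mathlib
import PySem

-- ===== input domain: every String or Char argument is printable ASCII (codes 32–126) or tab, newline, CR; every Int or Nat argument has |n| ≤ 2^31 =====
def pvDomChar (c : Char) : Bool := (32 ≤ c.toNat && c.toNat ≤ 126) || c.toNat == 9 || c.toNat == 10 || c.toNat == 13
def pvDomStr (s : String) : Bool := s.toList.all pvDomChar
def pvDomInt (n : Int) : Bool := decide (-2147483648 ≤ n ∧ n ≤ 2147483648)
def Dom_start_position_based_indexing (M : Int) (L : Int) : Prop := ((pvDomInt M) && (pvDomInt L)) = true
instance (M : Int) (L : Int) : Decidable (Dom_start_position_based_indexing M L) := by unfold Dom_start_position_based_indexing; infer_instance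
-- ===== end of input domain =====

-- B builds the offset table once with a running prefix sum and emits indices by a flat
-- comprehension over slices of it, instead of A's re-summed slices and nested index loops
-- (objective: alternative). A also memoizes results in a module-level dict; the equivalence
-- proved here is about the return value.

-- ===== PORT A =====
def start_position_based_indexing (M : Int) (L : Int) : List Int :=
  let num_substr_per_length := (PySem.List.pyRange 1 (L + 1) 1).reverse
  let num_substr_lt_length := (PySem.List.pyRange 0 L 1).map
      (fun i => (PySem.List.slice num_substr_per_length none (some i)).sum)
  (PySem.List.pyRange 0 L 1).foldl
    (fun l i =>
      (PySem.List.pyRange (i + 1) (min (L + 1) (i + M + 1)) 1).foldl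
        (fun l j => l ++ [PySem.List.pyGetD num_substr_lt_length (j - i - 1) 0 + i]) l)
    []

-- ===== PORT B =====
-- hand port of itertools.accumulate(xs, initial=acc): exact — emits acc, then each running sum
def pvAccum (acc : Int) : List Int → List Int
  | [] => [acc]
  | x :: xs => acc :: pvAccum (acc + x) xs

def start_position_based_indexing_alt (M : Int) (L : Int) : List Int :=
  let offsets := if 0 < L then
      PySem.List.slice (pvAccum 0 (PySem.List.pyRange L 0 (-1))) none (some (-1))
    else []
  (PySem.List.pyRange 0 L 1).flatMap
    (fun i => (PySem.List.slice offsets none (some (max 0 (min (L - i) M)))).map (fun o => o + i))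

-- ===== PRECONDITION & SPEC =====
def Spec_start_position_based_indexing (M : Int) (L : Int) (out : List Int) : Prop := out = start_position_based_indexing_alt M L
instance (M : Int) (L : Int) (out : List Int) : Decidable (Spec_start_position_based_indexing M L out) := by unfold Spec_start_position_based_indexing; infer_instance

-- ===== CLAIM (what is proved, stated in full; the proofs are below) =====
def Claim_equal_start_position_based_indexing : Prop := ∀ (M : Int) (L : Int), Dom_start_position_based_indexing M L → Spec_start_position_based_indexing M L (start_position_based_indexing M L)

-- ===== LEMMAS AND PROOFS =====

-- prefix sums of [L, L-1, L-2, …]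
def pvPsum (L : Int) : ℕ → Int
  | 0 => 0
  | k + 1 => pvPsum L k + (L - k)

theorem pvPsum_eq_sum (L : Int) (k : ℕ) :
    pvPsum L k = ((List.range k).map (fun t : ℕ => L - (t : Int))).sum := by
  induction k with
  | zero => simp [pvPsum]
  | succ n ih => simp [pvPsum, List.range_succ, ih]

theorem per_take_sum (L : Int) (k : ℕ) (hk : (k : Int) ≤ L) :
    (((PySem.List.pyRange 1 (L + 1) 1).reverse.take k).sum) = pvPsum L k := by
  have h1 : (PySem.List.pyRange 1 (L + 1) 1).reverse = PySem.List.pyRange L 0 (-1) := by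
    rw [PySem.List.pyRange_neg_one_eq_reverse]
    norm_num
  have hmin : min k (L - 0).toNat = k := by omega
  rw [h1, PySem.List.pyRange_neg_one, ← List.map_take, List.take_range, hmin, pvPsum_eq_sum]

theorem a_inner (M L i : Int) (hi0 : 0 ≤ i) (hiL : i < L) (out : List Int) :
    (PySem.List.pyRange (i + 1) (min (L + 1) (i + M + 1)) 1).foldl
        (fun l j => l ++ [PySem.List.pyGetD
            ((PySem.List.pyRange 0 L 1).map
              (fun x => (PySem.List.slice ((PySem.List.pyRange 1 (L + 1) 1).reverse) none (some x)).sum))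
            (j - i - 1) 0 + i]) out
      = out ++ (List.range ((min (L - i) M).toNat)).map (fun k => pvPsum L k + i) := by
  rw [PySem.List.foldl_append_singleton_eq_map,
      PySem.List.pyRange_one (i + 1) (min (L + 1) (i + M + 1)), List.map_map]
  have hc : (min (L + 1) (i + M + 1) - (i + 1)).toNat = (min (L - i) M).toNat := by omega
  rw [hc]
  congr 1
  apply List.map_congr_left
  intro k hk
  simp only [List.mem_range] at hk
  simp only [Function.comp]
  have hidx : (i + 1 + (k : Int)) - i - 1 = (k : Int) := by ring
  rw [hidx, PySem.List.pyGetD_map_pyRange_of_nonneg _ _ _ _ (by positivity) (by omega),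
      PySem.List.slice_to_natCast, per_take_sum L k (by omega)]

theorem a_eq (M L : Int) :
    start_position_based_indexing M L
      = (PySem.List.pyRange 0 L 1).flatMap
          (fun i => (List.range ((min (L - i) M).toNat)).map (fun k => pvPsum L k + i)) := by
  unfold start_position_based_indexing
  simp only []
  calc (PySem.List.pyRange 0 L 1).foldl
        (fun l i =>
          (PySem.List.pyRange (i + 1) (min (L + 1) (i + M + 1)) 1).foldl
            (fun l j => l ++ [PySem.List.pyGetD
                ((PySem.List.pyRange 0 L 1).map
                  (fun x => (PySem.List.slice ((PySem.List.pyRange 1 (L + 1) 1).reverse) none (some x)).sum))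
                (j - i - 1) 0 + i]) l)
        []
      = (PySem.List.pyRange 0 L 1).foldl
          (fun acc i => acc ++ (List.range ((min (L - i) M).toNat)).map (fun k => pvPsum L k + i))
          [] := by
        apply PySem.List.foldl_congr_mem
        intro acc i hmem
        have hi := PySem.List.mem_pyRange_one.mp hmem
        exact a_inner M L i hi.1 hi.2 acc
    _ = [] ++ (PySem.List.pyRange 0 L 1).flatMap
          (fun i => (List.range ((min (L - i) M).toNat)).map (fun k => pvPsum L k + i)) :=
        PySem.List.foldl_append_eq_flatMap _ _ _
    _ = (PySem.List.pyRange 0 L 1).flatMap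
          (fun i => (List.range ((min (L - i) M).toNat)).map (fun k => pvPsum L k + i)) := by
        simp

theorem pvAccum_drop (L : Int) (n m : ℕ) (hm : m ≤ n) :
    pvAccum (pvPsum L (n - m)) (((List.range n).map (fun k : ℕ => L - (k : Int))).drop (n - m))
      = ((List.range (n + 1)).map (fun k : ℕ => pvPsum L k)).drop (n - m) := by
  induction m with
  | zero =>
    simp only [Nat.sub_zero]
    rw [List.drop_eq_nil_of_le (by simp), List.range_succ, List.map_append,
        List.drop_left' (by simp)]
    rfl
  | succ m ih =>
    have hj : n - (m + 1) < n := by omega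
    have hj1 : n - (m + 1) + 1 = n - m := by omega
    rw [List.drop_eq_getElem_cons (by simpa using hj),
        List.drop_eq_getElem_cons (l := (List.range (n + 1)).map (fun k : ℕ => pvPsum L k))
          (by simp only [List.length_map, List.length_range]; omega)]
    simp only [List.getElem_map, List.getElem_range]
    rw [pvAccum]
    have hstep : pvPsum L (n - (m + 1)) + (L - (n - (m + 1) : ℕ)) = pvPsum L (n - m) := by
      rw [← hj1]
      rfl
    rw [hstep, hj1, ih (by omega)]

theorem offsets_eq (L : Int) (hL : 0 < L) :
    PySem.List.slice (pvAccum 0 (PySem.List.pyRange L 0 (-1))) none (some (-1))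
      = (List.range L.toNat).map (fun k : ℕ => pvPsum L k) := by
  rw [PySem.List.pyRange_neg_one]
  have hn : (L - 0).toNat = L.toNat := by omega
  have h := pvAccum_drop L L.toNat L.toNat le_rfl
  simp only [Nat.sub_self, List.drop_zero] at h
  have h0 : pvPsum L 0 = 0 := rfl
  rw [h0] at h
  rw [hn, h, PySem.List.slice_to_neg_one, List.range_succ, List.map_append]
  simp

theorem b_eq (M L : Int) :
    start_position_based_indexing_alt M L
      = (PySem.List.pyRange 0 L 1).flatMap
          (fun i => (List.range ((min (L - i) M).toNat)).map (fun k => pvPsum L k + i)) := by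
  unfold start_position_based_indexing_alt
  simp only []
  by_cases hL : 0 < L
  · rw [if_pos hL, offsets_eq L hL]
    refine List.flatMap_congr ?_
    intro i hmem
    have hi := PySem.List.mem_pyRange_one.mp hmem
    rw [PySem.List.slice_to _ (le_max_left 0 _), ← List.map_take, List.take_range]
    have hmin : min (max 0 (min (L - i) M)).toNat L.toNat = (min (L - i) M).toNat := by omega
    rw [hmin, List.map_map]
    rfl
  · rw [if_neg hL]
    have hnil : PySem.List.pyRange 0 L 1 = [] := PySem.List.pyRange_one_eq_nil (by omega)
    rw [hnil]
    rfl

-- ===== VERDICT (by name: the statement is the Claim_ definition above) =====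
theorem start_position_based_indexing_spec : Claim_equal_start_position_based_indexing := by
  intro M L _
  unfold Spec_start_position_based_indexing
  rw [a_eq, b_eq]
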